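-- pv_equiv track=rewrite | github.com/FinleyDavies/Misc-Python | courses/Learn Python Arrays with Time and Space Complexity/subarray_size_k.py | sub_array_ge
-- ===== SOURCE A (Python) =====
-- def sub_array_ge(array, S, smallest=0, v=0):
--     length = len(array)
--     if sum(array) >= S:
--         smallest = min(smallest, length) if smallest != 0 else length
--     else:
--         return array + [v]
--     # remove smallest value from either end:
--     if array[0] < array[-1]:
--         return sub_array_ge(array[1:], S, smallest, array[1])
--
--     return sub_array_ge(array[:-1], S, smallest, array[-1])
-- ===== SOURCE B (Python) =====
-- def sub_array_ge(array, S, smallest=0, v=0):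
--     # Iterative: one running sum over a left index into a right-truncated copy,
--     # instead of A's recursion that re-sums and re-slices at every step.
--     sub = list(array)
--     i = 0
--     total = sum(sub)
--     while total >= S:
--         if sub[i] < sub[-1]:
--             total -= sub[i]
--             i += 1
--             v = sub[i]
--         else:
--             v = sub.pop()
--             total -= v
--     return sub[i:] + [v]
-- ===== Notes on version B (the rewrite author's own statement) =====
-- stated objective: alternative
-- what changed: A recursively re-sums and re-slices the array at every shrink step; B runs one iterative loop keeping a running sum, a left index and right-end pops, slicing once at the end; B matches A everywhere A returns and raises IndexError exactly where A does.
import Mathlib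
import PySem

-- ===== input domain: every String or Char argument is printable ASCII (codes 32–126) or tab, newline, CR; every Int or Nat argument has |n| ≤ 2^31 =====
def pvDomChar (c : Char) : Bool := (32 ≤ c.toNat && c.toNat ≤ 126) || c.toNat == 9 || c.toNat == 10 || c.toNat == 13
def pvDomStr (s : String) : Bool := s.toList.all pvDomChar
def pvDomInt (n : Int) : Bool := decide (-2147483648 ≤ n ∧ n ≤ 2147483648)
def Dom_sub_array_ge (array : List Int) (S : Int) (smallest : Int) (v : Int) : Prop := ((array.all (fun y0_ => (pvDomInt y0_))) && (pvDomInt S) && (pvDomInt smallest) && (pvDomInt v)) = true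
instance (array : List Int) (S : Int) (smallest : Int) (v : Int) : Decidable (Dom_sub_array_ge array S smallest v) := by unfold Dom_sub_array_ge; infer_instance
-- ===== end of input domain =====

-- B replaces A's recursion (which re-sums and re-slices the array each step) by one iterative
-- loop with a running sum, a left index and right pops; A = B on Pre_ (exactly where A returns).


-- ===== PORT A =====
-- Literal transliteration of A's recursion. array[0]/array[-1] exist exactly when array ≠ [];
-- the [] branch is where Python raises IndexError (outside Pre_). In the left branch
-- array[1] = rest.headD 0 never defaults: a0 < last forces length ≥ 2.
def sub_array_ge (array : List Int) (S : Int) (smallest : Int) (v : Int) : List Int :=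
  if array.sum ≥ S then
    let smallest := if smallest ≠ 0 then min smallest (array.length : Int) else (array.length : Int)
    match array with
    | [] => []  -- Python raises IndexError on array[0] here; outside Pre_
    | a0 :: rest =>
      if a0 < (a0 :: rest).getLast (List.cons_ne_nil a0 rest) then
        sub_array_ge rest S smallest (rest.headD 0)
      else
        sub_array_ge (a0 :: rest).dropLast S smallest ((a0 :: rest).getLast (List.cons_ne_nil a0 rest))
  else
    array ++ [v]
termination_by array.length
decreasing_by
  · simp
  · simp [List.length_dropLast]

-- ===== PORT B =====
-- Source B's loop: state = (truncated list `sub` = array.take j via dropLast-pops, left index i,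
-- running sum `total`, last-removed v). sub[i] with i = len(sub) is Python's IndexError
-- (outside Pre_); that branch returns the slice like the loop exit so the port is total.
def subArrayGeLoop (S : Int) (sub : List Int) (i : Nat) (total v : Int) : List Int :=
  if total ≥ S then
    if h : i < sub.length then
      if sub.getD i 0 < sub.getD (sub.length - 1) 0 then
        subArrayGeLoop S sub (i + 1) (total - sub.getD i 0) (sub.getD (i + 1) 0)
      else
        subArrayGeLoop S sub.dropLast i (total - sub.getD (sub.length - 1) 0) (sub.getD (sub.length - 1) 0)
    else
      sub.drop i ++ [v]  -- Python raises IndexError on sub[i] here; outside Pre_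
  else
    sub.drop i ++ [v]
termination_by sub.length - i
decreasing_by all_goals first
  | omega
  | (simp [List.length_dropLast]; omega)

def sub_array_ge_alt (array : List Int) (S : Int) (smallest : Int) (v : Int) : List Int :=
  subArrayGeLoop S array 0 array.sum v

-- ===== PRECONDITION & SPEC =====
-- The end-shrinking chain (which end is dropped at each step) depends on the array alone;
-- chainMin array is the least sum among the segments that chain visits, down to the empty
-- segment (sum 0).
def chainMinAux : Nat → List Int → Int
  | 0, _ => 0
  | Nat.succ _, [] => 0
  | Nat.succ n, a0 :: rest =>
      min ((a0 :: rest).sum)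
        (if a0 < (a0 :: rest).getLast (List.cons_ne_nil a0 rest) then
          chainMinAux n rest
        else
          chainMinAux n (a0 :: rest).dropLast)

-- structural recursion on the length (each chain step removes exactly one element)
def chainMin (l : List Int) : Int := chainMinAux l.length l

-- Pre_ holds EXACTLY when Python A returns: A (and B) raise IndexError iff every segment of
-- the end-shrinking chain, down to the empty one, still has sum ≥ S, i.e. iff S ≤ chainMin.
-- No input on which A returns a value is excluded.
def Pre_sub_array_ge (array : List Int) (S : Int) (smallest : Int) (v : Int) : Prop :=
  chainMin array < S
instance (array : List Int) (S : Int) (smallest : Int) (v : Int) : Decidable (Pre_sub_array_ge array S smallest v) := by unfold Pre_sub_array_ge; infer_instance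

def pvWitness_sub_array_ge : List Int × Int × Int × Int := ([3, 1, 4, 1, 5], 6, 0, 0)

def Spec_sub_array_ge (array : List Int) (S : Int) (smallest : Int) (v : Int) (out : List Int) : Prop := out = sub_array_ge_alt array S smallest v
instance (array : List Int) (S : Int) (smallest : Int) (v : Int) (out : List Int) : Decidable (Spec_sub_array_ge array S smallest v out) := by unfold Spec_sub_array_ge; infer_instance

-- ===== CLAIM (what is proved, stated in full; the proofs are below) =====
def Claim_equal_sub_array_ge : Prop := ∀ (array : List Int) (S : Int) (smallest : Int) (v : Int), Dom_sub_array_ge array S smallest v → Pre_sub_array_ge array S smallest v → Spec_sub_array_ge array S smallest v (sub_array_ge array S smallest v)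

-- ===== LEMMAS AND PROOFS =====

-- seg l i j is the segment array[i:j] = sub[i:] that B's loop currently works on.
def seg (l : List Int) (i j : Nat) : List Int := (l.drop i).take (j - i)

lemma seg_cons (l : List Int) {i j : Nat} (hij : i < j) (hj : j ≤ l.length) :
    seg l i j = l.getD i 0 :: seg l (i + 1) j := by
  have hi : i < l.length := lt_of_lt_of_le hij hj
  have hd : l.drop i = l[i] :: l.drop (i + 1) := List.drop_eq_getElem_cons hi
  have hk : j - i = (j - (i + 1)) + 1 := by omega
  rw [seg, seg, hd, hk, List.take_succ_cons, List.getD_eq_getElem l 0 hi]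

lemma seg_snoc (l : List Int) {i j : Nat} (hij : i < j) (hj : j ≤ l.length) :
    seg l i j = seg l i (j - 1) ++ [l.getD (j - 1) 0] := by
  have hj1 : j - 1 < l.length := by omega
  have hk : j - i = (j - 1 - i) + 1 := by omega
  rw [seg, seg, hk, List.take_succ]
  have hget : (l.drop i)[j - 1 - i]? = some l[j - 1] := by
    rw [List.getElem?_drop]
    have : i + (j - 1 - i) = j - 1 := by omega
    rw [this, List.getElem?_eq_getElem hj1]
  rw [hget, List.getD_eq_getElem l 0 hj1]
  rfl

lemma seg_zero (l : List Int) : seg l 0 l.length = l := by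
  simp [seg]

lemma take_eq_seg (l : List Int) (j : Nat) (hj : j ≤ l.length) (i : Nat) (hij : i ≤ j) :
    (l.take j).drop i = seg l i j := by
  rw [seg, List.drop_take]

-- One unfolded step of A's recursion when the segment sum is still ≥ S.
lemma A_step (a0 : Int) (rest : List Int) (S sm v : Int) (h : (a0 :: rest).sum ≥ S) :
    sub_array_ge (a0 :: rest) S sm v =
      (if a0 < (a0 :: rest).getLast (List.cons_ne_nil a0 rest) then
        sub_array_ge rest S (if sm ≠ 0 then min sm ((a0 :: rest).length : Int) else ((a0 :: rest).length : Int)) (rest.headD 0)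
      else
        sub_array_ge (a0 :: rest).dropLast S (if sm ≠ 0 then min sm ((a0 :: rest).length : Int) else ((a0 :: rest).length : Int)) ((a0 :: rest).getLast (List.cons_ne_nil a0 rest))) := by
  rw [sub_array_ge, if_pos h]

-- Unfold chainMin on a nonempty list.
lemma chainMin_cons (a0 : Int) (rest : List Int) :
    chainMin (a0 :: rest) =
      min ((a0 :: rest).sum)
        (if a0 < (a0 :: rest).getLast (List.cons_ne_nil a0 rest) then
          chainMin rest
        else
          chainMin (a0 :: rest).dropLast) := by
  have hl : (a0 :: rest).dropLast.length = rest.length := by simp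
  simp only [chainMin, List.length_cons, chainMinAux, hl]

-- Main loop invariant: with sub = array.take j, total = sum of the current segment array[i:j],
-- and chainMin of that segment < S (A returns on it), B's loop equals A's recursion on the
-- segment, for every `smallest`.
lemma loop_eq_sub_array_ge (l : List Int) (S : Int) :
    ∀ (k i j : Nat) (sm v : Int), j - i = k → i ≤ j → j ≤ l.length →
      chainMin (seg l i j) < S →
      subArrayGeLoop S (l.take j) i ((seg l i j).sum) v = sub_array_ge (seg l i j) S sm v := by
  intro k
  induction k with
  | zero =>
    intro i j sm v hk hij hj hcm
    have hseg : seg l i j = [] := by simp [seg, show j - i = 0 from by omega]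
    have h0 : chainMin ([] : List Int) = 0 := rfl
    rw [hseg] at hcm ⊢
    rw [h0] at hcm
    rw [subArrayGeLoop, sub_array_ge]
    have hnot : ¬ ((0 : Int) ≥ S) := by simpa [List.sum_nil] using not_le.mpr hcm
    rw [if_neg (by simpa using hnot), if_neg (by simpa using hnot)]
    rw [take_eq_seg l j hj i hij, hseg]
  | succ k ih =>
    intro i j sm v hk hij hj hcm
    have hij' : i < j := by omega
    have hcons := seg_cons l hij' hj
    have hsnoc := seg_snoc l hij' hj
    have hlen : (l.take j).length = j := by
      rw [List.length_take]; omega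
    have hgeti : (l.take j).getD i 0 = l.getD i 0 := by
      have hi : i < l.length := by omega
      rw [List.getD_eq_getElem _ 0 (by omega : i < (l.take j).length),
          List.getD_eq_getElem l 0 hi, List.getElem_take]
    have hgetj : (l.take j).getD ((l.take j).length - 1) 0 = l.getD (j - 1) 0 := by
      have hj1 : j - 1 < l.length := by omega
      rw [hlen, List.getD_eq_getElem _ 0 (by omega : j - 1 < (l.take j).length),
          List.getD_eq_getElem l 0 hj1, List.getElem_take]
    by_cases hge : (seg l i j).sum ≥ S
    · -- both take a step
      have hlast : (l.getD i 0 :: seg l (i + 1) j).getLast (List.cons_ne_nil _ _)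
          = l.getD (j - 1) 0 := by
        have h1 : (l.getD i 0 :: seg l (i + 1) j).getLast? = some (l.getD (j - 1) 0) := by
          rw [← hcons, hsnoc]
          exact List.getLast?_concat
        rw [List.getLast?_eq_some_getLast (List.cons_ne_nil _ _)] at h1
        exact Option.some_injective _ h1
      have hgeC : (l.getD i 0 :: seg l (i + 1) j).sum ≥ S := hcons ▸ hge
      have hcmC : chainMin (l.getD i 0 :: seg l (i + 1) j) < S := hcons ▸ hcm
      rw [chainMin_cons, hlast] at hcmC
      rw [subArrayGeLoop, if_pos hge, dif_pos (by omega : i < (l.take j).length), hgeti, hgetj]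
      conv_rhs => rw [hcons]
      rw [A_step _ _ _ _ _ hgeC, hlast]
      by_cases hlt : l.getD i 0 < l.getD (j - 1) 0
      · rw [if_pos hlt, if_pos hlt]
        have hij2 : i + 1 < j := by
          rcases Nat.lt_or_ge (i + 1) j with h | h
          · exact h
          · exfalso
            have hji : j - 1 = i := by omega
            rw [hji] at hlt
            exact lt_irrefl _ hlt
        have hsum : (seg l i j).sum - l.getD i 0 = (seg l (i + 1) j).sum := by
          rw [hcons, List.sum_cons]; ring
        have hhead : (seg l (i + 1) j).headD 0 = l.getD (i + 1) 0 := by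
          rw [seg_cons l hij2 hj]; rfl
        have hgeti1 : (l.take j).getD (i + 1) 0 = l.getD (i + 1) 0 := by
          have hi1 : i + 1 < l.length := by omega
          rw [List.getD_eq_getElem _ 0 (by omega : i + 1 < (l.take j).length),
              List.getD_eq_getElem l 0 hi1, List.getElem_take]
        have hcm' : chainMin (seg l (i + 1) j) < S := by
          rw [if_pos hlt] at hcmC
          exact (min_lt_iff.mp hcmC).resolve_left (not_lt.mpr hgeC)
        rw [hsum, hgeti1, ← hhead]
        exact ih (i + 1) j _ _ (by omega) (by omega) hj hcm'
      · rw [if_neg hlt, if_neg hlt]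
        have hdrop : (l.getD i 0 :: seg l (i + 1) j).dropLast = seg l i (j - 1) := by
          rw [← hcons, hsnoc]
          exact List.dropLast_concat ..
        have hsum : (seg l i j).sum - l.getD (j - 1) 0 = (seg l i (j - 1)).sum := by
          rw [hsnoc, List.sum_append, List.sum_cons, List.sum_nil]; ring
        have htakedrop : (l.take j).dropLast = l.take (j - 1) := by
          rw [List.dropLast_eq_take, List.take_take]
          congr 1
          rw [List.length_take]
          omega
        have hcm' : chainMin (seg l i (j - 1)) < S := by
          rw [if_neg hlt, hdrop] at hcmC
          exact (min_lt_iff.mp hcmC).resolve_left (not_lt.mpr hgeC)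
        rw [hsum, hdrop, htakedrop]
        exact ih i (j - 1) _ _ (by omega) (by omega) (by omega) hcm'
    · -- both stop and return the segment plus [v]
      rw [subArrayGeLoop, sub_array_ge, if_neg hge, if_neg hge,
          take_eq_seg l j hj i (by omega)]

-- ===== VERDICT (by name: the statement is the Claim_ definition above) =====
theorem sub_array_ge_spec : Claim_equal_sub_array_ge := by
  intro array S smallest v _hDom hPre
  unfold Spec_sub_array_ge sub_array_ge_alt
  have h := loop_eq_sub_array_ge array S array.length 0 array.length smallest v
    (by omega) (Nat.zero_le _) le_rfl (by rw [seg_zero]; exact hPre)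
  rw [seg_zero, List.take_length] at h
  exact h.symm
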